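-- pv_equiv track=rewrite | github.com/bowie0713/CS9-lab | CS9/CS9:Lab/lab03/lab03.py | collectMultiples
-- ===== SOURCE A (Python) =====
-- def collectMultiples(intList, n):
--     if len(intList) == 0:
--         return []
--     if intList[len(intList)-1] % n == 0:
--         a = intList.pop()
--         return collectMultiples(intList, n) + [a]
--     intList.pop()
--     return collectMultiples(intList, n)
-- ===== SOURCE B (Python) =====
-- def collectMultiples(intList, n):
--     # Single forward comprehension instead of backward recursion; like A,
--     # it leaves intList empty on return (return-value equivalence is what is proved).
--     result = [x for x in intList if x % n == 0]
--     intList.clear()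
--     return result
-- ===== Notes on version B (the rewrite author's own statement) =====
-- stated objective: simpler
-- what changed: Replaces A's backward recursion with repeated pop/append by a single forward filter comprehension (plus one clear() to keep A's emptying side effect); no recursion, no per-element list concatenation.
import Mathlib
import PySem

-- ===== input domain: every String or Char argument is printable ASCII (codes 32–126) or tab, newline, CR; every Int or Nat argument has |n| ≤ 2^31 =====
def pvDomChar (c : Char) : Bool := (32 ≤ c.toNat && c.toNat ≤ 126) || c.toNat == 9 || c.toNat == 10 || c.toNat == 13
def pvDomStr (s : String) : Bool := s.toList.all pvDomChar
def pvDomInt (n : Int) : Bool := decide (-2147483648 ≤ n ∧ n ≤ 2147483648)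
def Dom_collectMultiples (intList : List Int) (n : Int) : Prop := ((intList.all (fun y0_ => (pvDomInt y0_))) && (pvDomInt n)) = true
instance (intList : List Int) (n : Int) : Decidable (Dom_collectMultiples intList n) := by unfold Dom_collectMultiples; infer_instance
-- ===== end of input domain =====

-- B: one forward filter pass instead of A's backward recursion; both empty the input list
-- in Python (return-value equivalence is what is proved here).
-- ===== PORT A =====
def collectMultiples (intList : List Int) (n : Int) : List Int :=
  if intList.length = 0 then []
  else
    match PySem.List.pyGet? intList (intList.length - 1) with
    | none => []  -- unreachable: the list is nonempty
    | some a =>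
      if PySem.Int.mod a n = 0 then
        collectMultiples intList.dropLast n ++ [a]
      else
        collectMultiples intList.dropLast n
termination_by intList.length
decreasing_by all_goals simp [List.length_dropLast]; omega

-- ===== PORT B =====
def collectMultiples_alt (intList : List Int) (n : Int) : List Int :=
  intList.filter (fun x => PySem.Int.mod x n = 0)

-- ===== PRECONDITION & SPEC =====
-- Pre_ excludes n = 0 with a nonempty list, where the Python A raises ZeroDivisionError
-- (B raises it there too); on the empty list A returns [] for any n.
def Pre_collectMultiples (intList : List Int) (n : Int) : Prop := n ≠ 0 ∨ intList = []
instance (intList : List Int) (n : Int) : Decidable (Pre_collectMultiples intList n) := by unfold Pre_collectMultiples; infer_instance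
def pvWitness_collectMultiples : List Int × Int := ([6, 7, -9, 0], 3)
def Spec_collectMultiples (intList : List Int) (n : Int) (out : List Int) : Prop := out = collectMultiples_alt intList n
instance (intList : List Int) (n : Int) (out : List Int) : Decidable (Spec_collectMultiples intList n out) := by unfold Spec_collectMultiples; infer_instance

-- ===== CLAIM (what is proved, stated in full; the proofs are below) =====
def Claim_equal_collectMultiples : Prop := ∀ (intList : List Int) (n : Int), Dom_collectMultiples intList n → Pre_collectMultiples intList n → Spec_collectMultiples intList n (collectMultiples intList n)

-- ===== LEMMAS AND PROOFS =====

-- ===== VERDICT (by name: the statement is the Claim_ definition above) =====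
-- A's backward recursion computes exactly the forward filter (for every n).
theorem collectMultiples_eq_filter (intList : List Int) (n : Int) :
    collectMultiples intList n = intList.filter (fun x => PySem.Int.mod x n = 0) := by
  induction intList using List.reverseRecOn with
  | nil => simp [collectMultiples]
  | append_singleton l a ih =>
    rw [collectMultiples]
    simp [PySem.List.pyGet?, PySem.List.pyIdx?, ih,
      List.filter_append]
    split_ifs with h <;> simp [h]

theorem collectMultiples_spec : Claim_equal_collectMultiples := by
  intro intList n _ _
  unfold Spec_collectMultiples collectMultiples_alt
  exact collectMultiples_eq_filter intList n
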